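-- pv_equiv track=rewrite | github.com/viktor-yakubiv/lp | lp.py | extract_teachers
-- ===== SOURCE A (Python) =====
-- def extract_teachers(timetable):
--     """Extracts unique teachers from a timetable"""
--     added_teachers = set()
--     teachers = []
--     for lesson in timetable:
--         for teacher in lesson['teachers']:
--             key = teacher['full_name']
--             if key in added_teachers:
--                 continue
--             added_teachers.add(key)
--             teachers.append(teacher)
--     teachers.sort(key=lambda t: t['full_name'])
--     return teachers
-- ===== SOURCE B (Python) =====
-- def extract_teachers(timetable):
--     """Extracts unique teachers from a timetable"""
--     flat = sorted((teacher for lesson in timetable for teacher in lesson['teachers']),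
--                   key=lambda t: t['full_name'])
--     if not flat:
--         return []
--     head, rest = flat[0], flat[1:]
--     return [head] + [cur for prev, cur in zip(flat, rest)
--                      if cur['full_name'] != prev['full_name']]
-- ===== Notes on version B (the rewrite author's own statement) =====
-- stated objective: alternative
-- what changed: Replaces A's seen-set dedup-in-encounter-order followed by a sort with: flatten, stable sort by full_name, then adjacent dedup done by zipping the sorted list with its own tail and keeping each element whose name differs from its predecessor.
import Mathlib
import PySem

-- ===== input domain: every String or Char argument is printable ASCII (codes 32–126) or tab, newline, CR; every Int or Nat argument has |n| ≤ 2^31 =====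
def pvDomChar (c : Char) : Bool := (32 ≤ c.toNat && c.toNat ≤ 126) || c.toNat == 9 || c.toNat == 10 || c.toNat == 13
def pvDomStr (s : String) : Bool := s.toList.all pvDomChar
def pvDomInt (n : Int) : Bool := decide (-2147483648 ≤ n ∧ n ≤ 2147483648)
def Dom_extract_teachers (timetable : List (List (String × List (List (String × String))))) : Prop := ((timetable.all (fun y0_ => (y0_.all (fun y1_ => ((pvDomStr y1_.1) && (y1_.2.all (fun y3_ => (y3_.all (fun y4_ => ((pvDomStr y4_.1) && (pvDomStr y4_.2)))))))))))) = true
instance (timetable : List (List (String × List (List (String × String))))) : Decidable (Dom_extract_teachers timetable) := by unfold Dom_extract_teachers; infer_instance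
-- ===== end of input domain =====

-- B replaces A's set-based dedup-then-sort by flatten, stable sort, then adjacent dedup via zipping the sorted list with its own tail (objective: alternative decomposition; return value only — neither version mutates its input).

-- shared dict accesses (t['full_name'] / lesson['teachers']); total via getD, Pre_ guarantees the key is present
def pvName (t : List (String × String)) : String := PySem.Dict.getD (PySem.Dict.mk t) "full_name" ""
def pvTeachers (lesson : List (String × List (List (String × String)))) : List (List (String × String)) := PySem.Dict.getD (PySem.Dict.mk lesson) "teachers" []

-- ===== PORT A =====
def extract_teachers (timetable : List (List (String × List (List (String × String))))) : List (List (String × String)) :=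
  let st := timetable.foldl
    (fun st lesson => (pvTeachers lesson).foldl
      (fun st teacher =>
        let key := pvName teacher
        if PySem.Set.contains st.1 key then st
        else (PySem.Set.add st.1 key, st.2 ++ [teacher])) st)
    ((PySem.Set.empty : PySem.Set String), ([] : List (List (String × String))))
  PySem.List.sorted st.2 pvName

-- ===== PORT B =====
-- 'if not flat: return []' / 'flat[0], flat[1:]' ported as the match on head :: rest
def extract_teachers_alt (timetable : List (List (String × List (List (String × String))))) : List (List (String × String)) :=
  let flat := PySem.List.sorted (timetable.flatMap (fun lesson => pvTeachers lesson)) pvName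
  match flat with
  | [] => []
  | head :: rest =>
    [head] ++ ((flat.zip rest).filter
      (fun pc => pvName pc.2 ≠ pvName pc.1)).map Prod.snd

-- ===== PRECONDITION & SPEC =====
-- Pre_ excludes exactly the inputs where Python A raises KeyError: a lesson without a
-- 'teachers' key, or a teacher without a 'full_name' key.
def Pre_extract_teachers (timetable : List (List (String × List (List (String × String))))) : Prop :=
  ∀ lesson ∈ timetable, PySem.Dict.contains (PySem.Dict.mk lesson) "teachers" = true ∧
    ∀ t ∈ PySem.Dict.getD (PySem.Dict.mk lesson) "teachers" [],
      PySem.Dict.contains (PySem.Dict.mk t) "full_name" = true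
instance (timetable : List (List (String × List (List (String × String))))) : Decidable (Pre_extract_teachers timetable) := by unfold Pre_extract_teachers; infer_instance

def pvWitness_extract_teachers : (List (List (String × List (List (String × String))))) :=
  [[("teachers", [[("full_name", "b")], [("full_name", "a")]])]]

def Spec_extract_teachers (timetable : List (List (String × List (List (String × String))))) (out : List (List (String × String))) : Prop := out = extract_teachers_alt timetable
instance (timetable : List (List (String × List (List (String × String))))) (out : List (List (String × String))) : Decidable (Spec_extract_teachers timetable out) := by unfold Spec_extract_teachers; infer_instance

-- ===== CLAIM (what is proved, stated in full; the proofs are below) =====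
def Claim_equal_extract_teachers : Prop := ∀ (timetable : List (List (String × List (List (String × String))))), Dom_extract_teachers timetable → Pre_extract_teachers timetable → Spec_extract_teachers timetable (extract_teachers timetable)

-- ===== LEMMAS AND PROOFS =====

-- recursive reading of A's dedup loop
def pvDedupGo (seen : PySem.Set String) : List (List (String × String)) → List (List (String × String))
  | [] => []
  | t :: ts =>
    if PySem.Set.contains seen (pvName t) then pvDedupGo seen ts
    else t :: pvDedupGo (PySem.Set.add seen (pvName t)) ts

-- dedup keeping each element whose name differs from the previous kept name
def pvAdjGo (prev : Option String) : List (List (String × String)) → List (List (String × String))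
  | [] => []
  | t :: ts =>
    if some (pvName t) ≠ prev then t :: pvAdjGo (some (pvName t)) ts else pvAdjGo prev ts

theorem pvFoldA (ts : List (List (String × String))) : ∀ (seen : PySem.Set String) (acc : List (List (String × String))),
    (ts.foldl (fun st teacher =>
        let key := pvName teacher
        if PySem.Set.contains st.1 key then st
        else (PySem.Set.add st.1 key, st.2 ++ [teacher])) (seen, acc)).2
      = acc ++ pvDedupGo seen ts := by
  induction ts with
  | nil => intro seen acc; simp [pvDedupGo]
  | cons t ts ih =>
    intro seen acc
    simp only [List.foldl_cons, pvDedupGo]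
    by_cases h : PySem.Set.contains seen (pvName t) = true
    · simp only [h, if_true, ih]
    · simp only [Bool.not_eq_true] at h
      simp only [h, Bool.false_eq_true, if_false, ih]
      simp

-- B's zip-with-tail dedup agrees with the prev-name accumulator reading:
-- in pvAdjGo the carried name is always the name of the last SCANNED element.
theorem pvZipAdj (ts : List (List (String × String))) : ∀ (h : List (String × String)),
    (((h :: ts).zip ts).filter (fun pc => pvName pc.2 ≠ pvName pc.1)).map Prod.snd
      = pvAdjGo (some (pvName h)) ts := by
  induction ts with
  | nil => intro h; simp [pvAdjGo]
  | cons t ts ih =>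
    intro h
    simp only [List.zip_cons_cons]
    by_cases hne : pvName t ≠ pvName h
    · rw [List.filter_cons_of_pos (by simpa using hne)]
      simp only [List.map_cons, ih t, pvAdjGo]
      rw [if_pos (by simpa using hne)]
    · rw [List.filter_cons_of_neg (by simpa using hne)]
      rw [ne_eq, not_not] at hne
      simp only [pvAdjGo, ne_eq, hne, not_true_eq_false, if_false]
      rw [← hne, ih t]

theorem pvMem_dedupGo (ts : List (List (String × String))) : ∀ (seen : PySem.Set String) (x : List (String × String)),
    x ∈ pvDedupGo seen ts ↔
      pvName x ∉ seen ∧ ts.find? (fun t => pvName t == pvName x) = some x := by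
  induction ts with
  | nil => intro seen x; simp [pvDedupGo]
  | cons t ts ih =>
    intro seen x
    by_cases hb : pvName t = pvName x
    · have hfind : (t :: ts).find? (fun u => pvName u == pvName x) = some t :=
        List.find?_cons_of_pos (by simp [hb])
      by_cases hs : PySem.Set.contains seen (pvName t) = true
      · have hmem : pvName x ∈ seen := by
          rw [← hb]; exact List.contains_iff_mem.mp hs
        simp only [pvDedupGo, hs, if_true, ih, hfind]
        constructor
        · rintro ⟨hn, _⟩; exact absurd hmem hn
        · rintro ⟨hn, _⟩; exact absurd hmem hn
      · simp only [Bool.not_eq_true] at hs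
        simp only [pvDedupGo, hs, Bool.false_eq_true, if_false, List.mem_cons, ih, hfind]
        have hns : pvName x ∉ seen := hb ▸ (by simpa using hs)
        constructor
        · rintro (rfl | ⟨hn, _⟩)
          · exact ⟨hns, rfl⟩
          · exact absurd (by rw [PySem.Set.mem_add]; right; exact hb.symm) hn
        · rintro ⟨_, hx⟩; left; exact (Option.some_inj.mp hx).symm
    · have hfind : (t :: ts).find? (fun u => pvName u == pvName x) = ts.find? (fun u => pvName u == pvName x) :=
        List.find?_cons_of_neg (by simp [hb])
      by_cases hs : PySem.Set.contains seen (pvName t) = true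
      · simp only [pvDedupGo, hs, if_true, ih, hfind]
      · simp only [Bool.not_eq_true] at hs
        simp only [pvDedupGo, hs, Bool.false_eq_true, if_false, List.mem_cons, ih, hfind]
        constructor
        · rintro (rfl | ⟨hn, hf⟩)
          · exact absurd rfl hb
          · refine ⟨fun hc => hn ?_, hf⟩
            rw [PySem.Set.mem_add]; left; exact hc
        · rintro ⟨hn, hf⟩
          right
          refine ⟨fun hc => ?_, hf⟩
          rw [PySem.Set.mem_add] at hc
          rcases hc with hc | hc
          · exact hn hc
          · exact hb hc.symm

theorem pvDedupGo_sublist (ts : List (List (String × String))) : ∀ (seen : PySem.Set String),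
    (pvDedupGo seen ts).Sublist ts := by
  induction ts with
  | nil => intro seen; simp [pvDedupGo]
  | cons t ts ih =>
    intro seen
    by_cases hs : PySem.Set.contains seen (pvName t) = true
    · simp only [pvDedupGo, hs, if_true]
      exact (ih seen).cons t
    · simp only [Bool.not_eq_true] at hs
      simp only [pvDedupGo, hs, Bool.false_eq_true, if_false]
      exact (ih _).cons₂ t

theorem pvDedupGo_keys_nodup (ts : List (List (String × String))) : ∀ (seen : PySem.Set String),
    ((pvDedupGo seen ts).map pvName).Nodup := by
  induction ts with
  | nil => intro seen; simp [pvDedupGo]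
  | cons t ts ih =>
    intro seen
    by_cases hs : PySem.Set.contains seen (pvName t) = true
    · simp only [pvDedupGo, hs, if_true]; exact ih seen
    · simp only [Bool.not_eq_true] at hs
      simp only [pvDedupGo, hs, Bool.false_eq_true, if_false, List.map_cons, List.nodup_cons]
      refine ⟨?_, ih _⟩
      intro hmem
      rcases List.mem_map.mp hmem with ⟨y, hy, hky⟩
      have := ((pvMem_dedupGo ts _ y).mp hy).1
      rw [hky] at this
      exact this (by rw [PySem.Set.mem_add]; right; rfl)

theorem pvDedupGo_pairwise_lt (ts : List (List (String × String))) (seen : PySem.Set String)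
    (hp : ts.Pairwise (fun a b => pvName a ≤ pvName b)) :
    (pvDedupGo seen ts).Pairwise (fun a b => pvName a < pvName b) := by
  have h1 := hp.sublist (pvDedupGo_sublist ts seen)
  have h2 := pvDedupGo_keys_nodup ts seen
  rw [List.Nodup, List.pairwise_map] at h2
  exact (h1.and h2).imp (fun h => lt_of_le_of_ne h.1 h.2)

theorem pvAdj_eq_dedup_aux (ts : List (List (String × String))) : ∀ (c : String) (seen : PySem.Set String),
    ts.Pairwise (fun a b => pvName a ≤ pvName b) →
    (∀ t ∈ ts, c ≤ pvName t) →
    (∀ t ∈ ts, (pvName t ∈ seen ↔ pvName t = c)) →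
    pvAdjGo (some c) ts = pvDedupGo seen ts := by
  induction ts with
  | nil => intro c seen _ _ _; simp [pvAdjGo, pvDedupGo]
  | cons t ts ih =>
    intro c seen hp hc hseen
    rw [List.pairwise_cons] at hp
    by_cases he : pvName t = c
    · have hcon : PySem.Set.contains seen (pvName t) = true := by
        simpa using ((hseen t (by simp)).mpr he)
      simp only [pvAdjGo, pvDedupGo, hcon, if_true]
      rw [if_neg (by simp [he])]
      exact ih c seen hp.2 (fun y hy => hc y (by simp [hy])) (fun y hy => hseen y (by simp [hy]))
    · have hcon : PySem.Set.contains seen (pvName t) = false := by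
        by_contra hb
        simp only [Bool.not_eq_false] at hb
        exact he ((hseen t (by simp)).mp (by simpa using hb))
      have hlt : c < pvName t := lt_of_le_of_ne (hc t (by simp)) (fun h => he h.symm)
      simp only [pvAdjGo, pvDedupGo, hcon, Bool.false_eq_true, if_false, ne_eq,
        Option.some_inj, he, not_false_eq_true, if_true]
      congr 1
      apply ih
      · exact hp.2
      · exact fun y hy => hp.1 y hy
      · intro y hy
        rw [PySem.Set.mem_add]
        constructor
        · rintro (hin | hin)
          · exfalso
            have h1 : pvName y = c := (hseen y (by simp [hy])).mp hin
            have h2 : pvName t ≤ pvName y := hp.1 y hy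
            rw [h1] at h2
            exact absurd (lt_of_lt_of_le hlt h2) (lt_irrefl c)
          · exact hin
        · intro h; right; exact h

theorem pvAdj_eq_dedup (ts : List (List (String × String)))
    (hp : ts.Pairwise (fun a b => pvName a ≤ pvName b)) :
    pvAdjGo none ts = pvDedupGo PySem.Set.empty ts := by
  cases ts with
  | nil => simp [pvAdjGo, pvDedupGo]
  | cons t ts =>
    rw [List.pairwise_cons] at hp
    have hcon : PySem.Set.contains PySem.Set.empty (pvName t) = false := by
      simp [PySem.Set.empty, PySem.Set.contains]
    simp only [pvAdjGo, pvDedupGo, hcon, Bool.false_eq_true, if_false, ne_eq,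
      reduceCtorEq, not_false_eq_true, if_true]
    congr 1
    apply pvAdj_eq_dedup_aux
    · exact hp.2
    · exact fun y hy => hp.1 y hy
    · intro y hy
      rw [PySem.Set.mem_add]
      simp [PySem.Set.empty]

theorem pvPairwise_insertBy (x : List (String × String)) (ys : List (List (String × String)))
    (h : ys.Pairwise (fun a b => pvName a ≤ pvName b)) :
    (PySem.List.insertBy (fun a b => decide (pvName a < pvName b)) x ys).Pairwise
      (fun a b => pvName a ≤ pvName b) := by
  induction ys with
  | nil => simp [PySem.List.insertBy]
  | cons y ys ih =>
    rw [List.pairwise_cons] at h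
    by_cases hlt : pvName x < pvName y
    · simp only [PySem.List.insertBy, decide_eq_true_eq, hlt, if_true]
      rw [List.pairwise_cons]
      refine ⟨?_, List.pairwise_cons.mpr h⟩
      intro z hz
      rcases List.mem_cons.mp hz with rfl | hz
      · exact le_of_lt hlt
      · exact le_trans (le_of_lt hlt) (h.1 z hz)
    · simp only [PySem.List.insertBy, decide_eq_true_eq, hlt, if_false]
      rw [List.pairwise_cons]
      refine ⟨?_, ih h.2⟩
      intro z hz
      rcases (PySem.List.mem_insertBy _ _ _ _).mp hz with rfl | hz
      · exact le_of_not_gt hlt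
      · exact h.1 z hz

theorem pvFilter_insertBy (x : List (String × String)) (c : String) (ys : List (List (String × String)))
    (h : ys.Pairwise (fun a b => pvName a ≤ pvName b)) :
    (PySem.List.insertBy (fun a b => decide (pvName a < pvName b)) x ys).filter (fun t => pvName t == c)
      = if pvName x = c then ys.filter (fun t => pvName t == c) ++ [x]
        else ys.filter (fun t => pvName t == c) := by
  induction ys with
  | nil => by_cases hx : pvName x = c <;> simp [PySem.List.insertBy, List.filter, hx]
  | cons y ys ih =>
    rw [List.pairwise_cons] at h
    by_cases hlt : pvName x < pvName y
    · simp only [PySem.List.insertBy, decide_eq_true_eq, hlt, if_true]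
      by_cases hx : pvName x = c
      · rw [if_pos hx]
        have hemp : (y :: ys).filter (fun t => pvName t == c) = [] := by
          rw [List.filter_eq_nil_iff]
          intro z hz
          have hyz : pvName y ≤ pvName z := by
            rcases List.mem_cons.mp hz with rfl | hz'
            · exact le_refl _
            · exact h.1 z hz'
          have : c < pvName z := lt_of_lt_of_le (hx ▸ hlt) hyz
          simp [ne_of_gt this]
        rw [hemp, List.nil_append]
        rw [List.filter_cons_of_pos (by simp [hx])]
        simpa [List.filter] using hemp
      · rw [if_neg hx]
        rw [List.filter_cons_of_neg (by simp [hx])]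
    · simp only [PySem.List.insertBy, decide_eq_true_eq, hlt, if_false]
      by_cases hy : pvName y = c
      · rw [List.filter_cons_of_pos (by simp [hy]), List.filter_cons_of_pos (by simp [hy]), ih h.2]
        by_cases hx : pvName x = c <;> simp [hx]
      · rw [List.filter_cons_of_neg (by simp [hy]), List.filter_cons_of_neg (by simp [hy]), ih h.2]

theorem pvFilter_foldl_insertBy (L : List (List (String × String))) : ∀ (acc : List (List (String × String))) (c : String),
    acc.Pairwise (fun a b => pvName a ≤ pvName b) →
    (L.foldl (fun acc x => PySem.List.insertBy (fun a b => decide (pvName a < pvName b)) x acc) acc).filter (fun t => pvName t == c)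
      = acc.filter (fun t => pvName t == c) ++ L.filter (fun t => pvName t == c) := by
  induction L with
  | nil => intro acc c _; simp
  | cons t L ih =>
    intro acc c hacc
    rw [List.foldl_cons, ih _ c (pvPairwise_insertBy t acc hacc), pvFilter_insertBy t c acc hacc]
    by_cases hx : pvName t = c
    · rw [if_pos hx, List.filter_cons_of_pos (by simp [hx])]
      simp
    · rw [if_neg hx, List.filter_cons_of_neg (by simp [hx])]

theorem pvFilter_sorted (L : List (List (String × String))) (c : String) :
    (PySem.List.sorted L pvName).filter (fun t => pvName t == c) = L.filter (fun t => pvName t == c) := by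
  rw [PySem.List.sorted_eq_foldl_insertBy]
  simpa using pvFilter_foldl_insertBy L [] c (by simp)

theorem pvFind?_sorted (L : List (List (String × String))) (c : String) :
    (PySem.List.sorted L pvName).find? (fun t => pvName t == c) = L.find? (fun t => pvName t == c) := by
  rw [← List.head?_filter, ← List.head?_filter, pvFilter_sorted]

theorem pvMain (L : List (List (String × String))) :
    PySem.List.sorted (pvDedupGo PySem.Set.empty L) pvName
      = pvAdjGo none (PySem.List.sorted L pvName) := by
  rw [pvAdj_eq_dedup _ (PySem.List.sorted_pairwise L pvName)]
  apply PySem.List.sorted_eq_of_perm_of_pairwise_lt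
  · rw [List.perm_ext_iff_of_nodup ((pvDedupGo_keys_nodup _ _).of_map) ((pvDedupGo_keys_nodup _ _).of_map)]
    intro x
    rw [pvMem_dedupGo, pvMem_dedupGo, pvFind?_sorted]
  · exact pvDedupGo_pairwise_lt _ _ (PySem.List.sorted_pairwise L pvName)

-- ===== VERDICT (by name: the statement is the Claim_ definition above) =====
theorem extract_teachers_spec : Claim_equal_extract_teachers := by
  intro timetable _ _
  show extract_teachers timetable = extract_teachers_alt timetable
  simp only [extract_teachers, extract_teachers_alt]
  rw [← List.foldl_flatMap (f := fun lesson => pvTeachers lesson)]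
  rw [pvFoldA, List.nil_append, pvMain]
  cases hs : PySem.List.sorted (timetable.flatMap (fun lesson => pvTeachers lesson)) pvName with
  | nil => simp [pvAdjGo]
  | cons head rest =>
    simp only [pvAdjGo, ne_eq, reduceCtorEq, not_false_eq_true, if_true]
    rw [← pvZipAdj rest head]
    simp
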